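-- pv_equiv track=rewrite | github.com/shahar603/SpaceXtract | step_test.py | refine_graph
-- ===== SOURCE A (Python) =====
-- def refine_graph(x, y):
--     new_x = [x[0]]
--     new_y = [y[0]]
--
--
--     for i in range(1, len(x)):
--         if y[i] != new_y[-1]:
--             new_x.append(x[i])
--             new_y.append(y[i])
--
--
--     return new_x, new_y
-- ===== SOURCE B (Python) =====
-- def refine_graph(x, y):
--     pairs = list(zip(x, y))
--     out = []
--     i = 0
--     n = len(pairs)
--     while i < n:
--         out.append(pairs[i])
--         j = i + 1
--         while j < n and pairs[j][1] == pairs[i][1]: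
--             j += 1
--         i = j
--     return [p[0] for p in out], [p[1] for p in out]
-- ===== Notes on version B (the rewrite author's own statement) =====
-- stated objective: alternative
-- what changed: Replaced A's stateful append-loop comparing each y[i] against the last kept value new_y[-1] with a two-pointer run-partition over the zipped pair list: an outer loop emits the representative at the start of each maximal run of equal y and an inner loop advances a second pointer past the whole run, then the representatives are unzipped.
import Mathlib
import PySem

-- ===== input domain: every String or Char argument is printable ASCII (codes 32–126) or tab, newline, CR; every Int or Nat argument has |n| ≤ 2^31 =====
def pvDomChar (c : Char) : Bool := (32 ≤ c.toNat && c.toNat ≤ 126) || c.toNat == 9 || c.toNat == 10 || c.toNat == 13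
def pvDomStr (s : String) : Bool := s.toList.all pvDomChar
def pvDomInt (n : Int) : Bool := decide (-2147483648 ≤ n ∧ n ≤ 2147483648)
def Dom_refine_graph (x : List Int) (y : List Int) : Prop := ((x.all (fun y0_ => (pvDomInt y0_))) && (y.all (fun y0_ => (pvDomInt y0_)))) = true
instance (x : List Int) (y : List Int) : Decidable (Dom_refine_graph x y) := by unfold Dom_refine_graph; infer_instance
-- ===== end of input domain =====

-- B partitions the zipped pair list into maximal runs of equal y with a two-pointer loop and keeps each run's first pair; objective: alternative (same cost, different traversal).


-- ===== PORT A =====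
-- transliteration of A: start with [x[0]], [y[0]], then for i in range(1, len(x)) append when y[i] != new_y[-1]
def refine_graph (x : List Int) (y : List Int) : List Int × List Int :=
  let new_x : List Int := [PySem.List.pyGetD x 0 0]
  let new_y : List Int := [PySem.List.pyGetD y 0 0]
  (PySem.List.pyRange 1 x.length 1).foldl
    (fun (st : List Int × List Int) i =>
      if PySem.List.pyGetD y i 0 ≠ PySem.List.pyGetD st.2 (-1) 0 then
        (st.1 ++ [PySem.List.pyGetD x i 0], st.2 ++ [PySem.List.pyGetD y i 0])
      else st)
    (new_x, new_y)

-- ===== PORT B =====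
-- inner while loop of B: advance j past the run of pairs whose y equals v
-- (fuel only makes the recursion structural; fuel = pairs.length always suffices since j increases each step)
def skipRun (pairs : List (Int × Int)) (v : Int) (j : Nat) (fuel : Nat) : Nat :=
  match fuel with
  | 0 => j
  | fuel + 1 =>
    if h : j < pairs.length then
      if pairs[j].2 = v then skipRun pairs v (j + 1) fuel else j
    else j

-- outer while loop of B: emit the representative at i, then jump to the end of its run
def runsLoop (pairs : List (Int × Int)) (i : Nat) (out : List (Int × Int)) (fuel : Nat) : List (Int × Int) :=
  match fuel with
  | 0 => out
  | fuel + 1 =>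
    if h : i < pairs.length then
      runsLoop pairs (skipRun pairs pairs[i].2 (i + 1) pairs.length) (out ++ [pairs[i]]) fuel
    else out

-- transliteration of B: pairs = list(zip(x, y)); two-pointer run scan; unzip the representatives
def refine_graph_alt (x : List Int) (y : List Int) : List Int × List Int :=
  let pairs := x.zip y
  let out := runsLoop pairs 0 [] pairs.length
  (out.map Prod.fst, out.map Prod.snd)

-- ===== PRECONDITION & SPEC =====
-- Pre_ excludes exactly the inputs on which Python A raises IndexError: empty x (x[0]) or y shorter than x (y[i] in the loop).
def Pre_refine_graph (x : List Int) (y : List Int) : Prop := x ≠ [] ∧ x.length ≤ y.length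
instance (x : List Int) (y : List Int) : Decidable (Pre_refine_graph x y) := by unfold Pre_refine_graph; infer_instance
def pvWitness_refine_graph : List Int × List Int := ([1, 2, 2, 3], [5, 5, 7, 7])

def Spec_refine_graph (x : List Int) (y : List Int) (out : List Int × List Int) : Prop := out = refine_graph_alt x y
instance (x : List Int) (y : List Int) (out : List Int × List Int) : Decidable (Spec_refine_graph x y out) := by unfold Spec_refine_graph; infer_instance

-- ===== CLAIM (what is proved, stated in full; the proofs are below) =====
def Claim_equal_refine_graph : Prop := ∀ (x : List Int) (y : List Int), Dom_refine_graph x y → Pre_refine_graph x y → Spec_refine_graph x y (refine_graph x y)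

-- ===== LEMMAS AND PROOFS =====

-- reference form of the run-representatives list
def reps : List (Int × Int) → List (Int × Int)
  | [] => []
  | p :: l => p :: reps (l.dropWhile (fun q => q.2 == p.2))
termination_by l => l.length
decreasing_by
  have := List.length_dropWhile_le (fun q => q.2 == p.2) l
  simp; omega

-- reference form of A's loop: compare against the last kept y
def loopA (v : Int) : List (Int × Int) → List (Int × Int)
  | [] => []
  | p :: l => if p.2 ≠ v then p :: loopA p.2 l else loopA v l

theorem loopA_eq_reps (l : List (Int × Int)) (v : Int) :
    loopA v l = reps (l.dropWhile (fun q => q.2 == v)) := by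
  induction l generalizing v with
  | nil => simp [loopA, reps]
  | cons p l ih =>
    by_cases h : p.2 = v
    · simp [loopA, h, ih]
    · simp [loopA, h, reps, ih]

theorem skipRun_ge (pairs : List (Int × Int)) (v : Int) (j : Nat) (fuel : Nat) :
    j ≤ skipRun pairs v j fuel := by
  induction fuel generalizing j with
  | zero => simp [skipRun]
  | succ fuel ih =>
    unfold skipRun
    split
    · split
      · have := ih (j + 1); omega
      · exact le_refl j
    · exact le_refl j

theorem drop_skipRun (pairs : List (Int × Int)) (v : Int) (j : Nat) (fuel : Nat)
    (hf : pairs.length - j ≤ fuel) :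
    pairs.drop (skipRun pairs v j fuel) = (pairs.drop j).dropWhile (fun q => q.2 == v) := by
  induction fuel generalizing j with
  | zero =>
    rw [skipRun, List.drop_eq_nil_of_le (by omega)]
    simp
  | succ fuel ih =>
    unfold skipRun
    split
    · rename_i h
      have hd : pairs.drop j = pairs[j] :: pairs.drop (j + 1) := List.drop_eq_getElem_cons h
      split
      · rename_i he
        rw [ih (j + 1) (by omega), hd, List.dropWhile_cons]
        simp [he]
      · rename_i he
        rw [hd, List.dropWhile_cons]
        simp [he]
    · rename_i h
      rw [List.drop_eq_nil_of_le (by omega)]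
      simp

theorem runsLoop_eq (pairs : List (Int × Int)) (fuel : Nat) (i : Nat) (out : List (Int × Int))
    (hf : pairs.length - i ≤ fuel) :
    runsLoop pairs i out fuel = out ++ reps (pairs.drop i) := by
  induction fuel generalizing i out with
  | zero =>
    rw [runsLoop, List.drop_eq_nil_of_le (by omega)]
    simp [reps]
  | succ fuel ih =>
    unfold runsLoop
    split
    · rename_i h
      have hge := skipRun_ge pairs pairs[i].2 (i + 1) pairs.length
      rw [ih (skipRun pairs pairs[i].2 (i + 1) pairs.length) (out ++ [pairs[i]]) (by omega)]
      rw [drop_skipRun pairs pairs[i].2 (i + 1) pairs.length (by omega),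
          List.drop_eq_getElem_cons h, reps]
      simp
    · rename_i h
      rw [List.drop_eq_nil_of_le (by omega)]
      simp [reps]

-- A's foldl over the remaining pairs, with a nonempty kept list, appends exactly loopA of them
theorem foldA_eq (l : List (Int × Int)) (acc : List (Int × Int)) (hne : acc ≠ []) :
    l.foldl
      (fun (st : List Int × List Int) (p : Int × Int) =>
        if p.2 ≠ PySem.List.pyGetD st.2 (-1) 0 then
          (st.1 ++ [p.1], st.2 ++ [p.2])
        else st)
      (acc.map Prod.fst, acc.map Prod.snd)
    = ((acc ++ loopA (acc.getLast hne).2 l).map Prod.fst,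
       (acc ++ loopA (acc.getLast hne).2 l).map Prod.snd) := by
  induction l generalizing acc with
  | nil => simp [loopA]
  | cons p l ih =>
    have hlast : PySem.List.pyGetD (acc.map Prod.snd) (-1) 0 = (acc.getLast hne).2 := by
      rw [PySem.List.pyGetD_neg_one _ 0 (by simpa using hne)]
      simp [List.getLast_map]
    simp only [List.foldl_cons, hlast]
    by_cases h : p.2 = (acc.getLast hne).2
    · rw [if_neg (by simp [h]), loopA, if_neg (by simp [h])]
      exact ih acc hne
    · rw [if_pos h, loopA, if_pos h]
      have hne' : acc ++ [p] ≠ [] := by simp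
      have := ih (acc ++ [p]) hne'
      simp only [List.map_append, List.map_cons, List.map_nil] at this ⊢
      rw [this]
      simp

-- ===== VERDICT (by name: the statement is the Claim_ definition above) =====
theorem refine_graph_spec : Claim_equal_refine_graph := by
  intro x y _ hpre
  obtain ⟨hxne, hlen⟩ := hpre
  obtain ⟨a, xs, rfl⟩ := List.exists_cons_of_ne_nil hxne
  obtain ⟨b, ys, rfl⟩ := List.exists_cons_of_ne_nil
    (show y ≠ [] by intro h; subst h; simp at hlen)
  unfold Spec_refine_graph refine_graph refine_graph_alt
  simp only []
  set pairs := (a :: xs).zip (b :: ys) with hpairs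
  have hlenp : pairs.length = (a :: xs).length := by
    simp only [hpairs, List.length_zip, List.length_cons]
    simp only [List.length_cons] at hlen
    omega
  -- A's index loop = fold of the same step over the zipped pair list
  have hcongr :
      (PySem.List.pyRange 1 ((a :: xs).length) 1).foldl
        (fun (st : List Int × List Int) i =>
          if PySem.List.pyGetD (b :: ys) i 0 ≠ PySem.List.pyGetD st.2 (-1) 0 then
            (st.1 ++ [PySem.List.pyGetD (a :: xs) i 0], st.2 ++ [PySem.List.pyGetD (b :: ys) i 0])
          else st)
        ([PySem.List.pyGetD (a :: xs) 0 0], [PySem.List.pyGetD (b :: ys) 0 0])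
      = (PySem.List.pyRange 1 (pairs.length) 1).foldl
        (fun (st : List Int × List Int) i =>
          (fun (st : List Int × List Int) (p : Int × Int) =>
            if p.2 ≠ PySem.List.pyGetD st.2 (-1) 0 then
              (st.1 ++ [p.1], st.2 ++ [p.2])
            else st) st (PySem.List.pyGetD pairs i (0, 0)))
        ([PySem.List.pyGetD (a :: xs) 0 0], [PySem.List.pyGetD (b :: ys) 0 0]) := by
    rw [hlenp]
    apply PySem.List.foldl_congr_mem
    intro acc i hi
    rw [PySem.List.mem_pyRange_one] at hi
    have h0 : (0 : Int) ≤ i := by omega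
    have hix : i < ((a :: xs).length : Int) := hi.2
    have hiy : i < ((b :: ys).length : Int) := by
      simp only [List.length_cons] at hlen hix ⊢
      push_cast at hix ⊢; omega
    have hip : i < (pairs.length : Int) := by rw [hlenp]; exact hix
    have hix' : i.toNat < (a :: xs).length := by omega
    have hiy' : i.toNat < (b :: ys).length := by omega
    have hip' : i.toNat < pairs.length := by omega
    rw [PySem.List.pyGetD_eq_getElem pairs (0, 0) h0 hip,
        PySem.List.pyGetD_eq_getElem (a :: xs) 0 h0 hix,
        PySem.List.pyGetD_eq_getElem (b :: ys) 0 h0 hiy]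
    have hz : pairs[i.toNat]'hip' = ((a :: xs)[i.toNat]'hix', (b :: ys)[i.toNat]'hiy') := by
      simp only [hpairs]; exact List.getElem_zip
    rw [hz]
  rw [hcongr]
  rw [show ((pairs.length : Int)) = ((pairs.length : Int)) from rfl]
  rw [PySem.List.foldl_pyRange_pyGetD' pairs (0, 0)
        (fun (st : List Int × List Int) (p : Int × Int) =>
          if p.2 ≠ PySem.List.pyGetD st.2 (-1) 0 then
            (st.1 ++ [p.1], st.2 ++ [p.2])
          else st)
        ([PySem.List.pyGetD (a :: xs) 0 0], [PySem.List.pyGetD (b :: ys) 0 0])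
        (by omega : (0:Int) ≤ 1)]
  have hinit : ([PySem.List.pyGetD (a :: xs) 0 0], [PySem.List.pyGetD (b :: ys) 0 0])
      = (([((a : Int), (b : Int))].map Prod.fst), ([((a : Int), (b : Int))].map Prod.snd)) := by
    simp [PySem.List.pyGetD_zero_cons]
  rw [hinit, foldA_eq _ [(a, b)] (by simp)]
  rw [runsLoop_eq _ _ _ _ (by omega), List.drop_zero, List.nil_append]
  have hdrop : pairs.drop (1 : Int).toNat = xs.zip ys := by simp [hpairs]
  rw [hdrop]
  have : reps pairs = (a, b) :: reps ((xs.zip ys).dropWhile (fun q => q.2 == b)) := by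
    rw [hpairs]; simp [List.zip, reps]
  rw [this]
  rw [show ([((a : Int), (b : Int))].getLast (by simp)) = (a, b) from rfl]
  rw [loopA_eq_reps]
  simp
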